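-- pv_equiv track=rewrite | github.com/camfort/camfort-ai | openai-transcripts/txt-to-jsonl.py | split_one_record
-- ===== SOURCE A (Python) =====
-- def split_one_record(record):
--     mode = 0
--     out = []
--     inp = []
--     for line in record:
--         if line.strip() == '"""':
--             mode = 0
--         elif mode == 0:
--             if line.startswith('Input:'):
--                 mode = 1
--             elif line.startswith('Output:'):
--                 mode = 2
--         elif mode == 1:
--             inp.append(line)
--         elif mode == 2:
--             out.append(line)
--     return inp, out
-- ===== SOURCE B (Python) =====
-- def _scan(block):
--     for i, line in enumerate(block):
--         if line.startswith('Input:'):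
--             return True, block[i+1:]
--         if line.startswith('Output:'):
--             return False, block[i+1:]
--     return None
--
--
-- def split_one_record(record):
--     # group lines into blocks delimited by lines whose strip() == '"""'
--     blocks = [[]]
--     for line in record:
--         if line.strip() == '"""':
--             blocks.append([])
--         else:
--             blocks[-1].append(line)
--     inp, out = [], []
--     for b in blocks:
--         r = _scan(b)
--         if r is not None:
--             (inp if r[0] else out).extend(r[1])
--     return inp, out
-- ===== Notes on version B (the rewrite author's own statement) =====
-- stated objective: alternative
-- what changed: Replaces A's single-pass mode-variable state machine by a two-level decomposition: first group lines into blocks delimited by strip()=='"""' lines, then scan each block for its first Input:/Output: marker and extend the corresponding list with the lines after it.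
import Mathlib
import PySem

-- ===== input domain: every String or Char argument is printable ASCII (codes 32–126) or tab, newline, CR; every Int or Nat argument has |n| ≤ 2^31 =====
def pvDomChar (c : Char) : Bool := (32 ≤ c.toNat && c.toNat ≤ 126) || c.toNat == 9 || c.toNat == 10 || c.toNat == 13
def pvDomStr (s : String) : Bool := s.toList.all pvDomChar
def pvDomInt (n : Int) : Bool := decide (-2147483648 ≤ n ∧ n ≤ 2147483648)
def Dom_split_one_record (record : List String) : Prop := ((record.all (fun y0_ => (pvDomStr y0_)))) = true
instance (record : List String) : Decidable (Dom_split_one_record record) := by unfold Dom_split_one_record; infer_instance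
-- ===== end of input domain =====

-- B replaces A's flat mode-variable state machine by a two-level group-then-scan decomposition (alternative, same cost).


-- ===== PORT A =====
def pvStepA (s : Int × List String × List String) (line : String) : Int × List String × List String :=
  let (mode, inp, out) := s
  if PySem.Str.strip line = "\"\"\"" then (0, inp, out)
  else if mode = 0 then
    if PySem.Str.startswith line "Input:" then (1, inp, out)
    else if PySem.Str.startswith line "Output:" then (2, inp, out)
    else (mode, inp, out)
  else if mode = 1 then (mode, inp ++ [line], out)
  else if mode = 2 then (mode, inp, out ++ [line])
  else (mode, inp, out)

def split_one_record (record : List String) : List String × List String :=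
  let st := record.foldl pvStepA (0, [], [])
  (st.2.1, st.2.2)

-- ===== PORT B =====
-- _scan: first Input:/Output: marker of a block, with the lines after it
def pvScan (block : List String) : Option (Bool × List String) :=
  match block with
  | [] => none
  | line :: rest =>
    if PySem.Str.startswith line "Input:" then some (true, rest)
    else if PySem.Str.startswith line "Output:" then some (false, rest)
    else pvScan rest

def pvSplitStep (s : List (List String) × List String) (line : String) : List (List String) × List String :=
  if PySem.Str.strip line = "\"\"\"" then (s.1 ++ [s.2], [])
  else (s.1, s.2 ++ [line])

def pvProcStep (acc : List String × List String) (b : List String) : List String × List String :=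
  match pvScan b with
  | some (true, rest) => (acc.1 ++ rest, acc.2)
  | some (false, rest) => (acc.1, acc.2 ++ rest)
  | none => acc

def split_one_record_alt (record : List String) : List String × List String :=
  let s := record.foldl pvSplitStep ([], [])
  let blocks := s.1 ++ [s.2]
  blocks.foldl pvProcStep ([], [])

-- ===== PRECONDITION & SPEC =====
def Spec_split_one_record (record : List String) (out : List String × List String) : Prop := out = split_one_record_alt record
instance (record : List String) (out : List String × List String) : Decidable (Spec_split_one_record record out) := by unfold Spec_split_one_record; infer_instance

-- ===== CLAIM (what is proved, stated in full; the proofs are below) =====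
def Claim_equal_split_one_record : Prop := ∀ (record : List String), Dom_split_one_record record → Spec_split_one_record record (split_one_record record)

-- ===== LEMMAS AND PROOFS =====

-- reference block decomposition (foldr-style), used only in the proofs
def pvBlocksR : List String → List (List String)
  | [] => [[]]
  | l :: t =>
    if PySem.Str.strip l = "\"\"\"" then [] :: pvBlocksR t
    else match pvBlocksR t with
      | b :: bs => (l :: b) :: bs
      | [] => [[l]]

theorem pvBlocksR_ne_nil (t : List String) : pvBlocksR t ≠ [] := by
  cases t with
  | nil => simp [pvBlocksR]
  | cons l t =>
    simp only [pvBlocksR]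
    split
    · simp
    · split <;> simp

-- the forward (foldl) block builder equals the foldr-style one, up to the open current block
theorem pvSplit_eq_blocksR (t : List String) : ∀ (bs : List (List String)) (cur : List String),
    (t.foldl pvSplitStep (bs, cur)).1 ++ [(t.foldl pvSplitStep (bs, cur)).2] =
      bs ++ (match pvBlocksR t with
             | b :: bs' => (cur ++ b) :: bs'
             | [] => [cur]) := by
  induction t with
  | nil => intro bs cur; simp [pvBlocksR]
  | cons l t ih =>
    intro bs cur
    simp only [List.foldl_cons, pvSplitStep, pvBlocksR]
    split_ifs with h
    · rw [ih]
      cases hb : pvBlocksR t with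
      | nil => exact absurd hb (pvBlocksR_ne_nil t)
      | cons b bs' => simp
    · rw [ih]
      cases hb : pvBlocksR t with
      | nil => exact absurd hb (pvBlocksR_ne_nil t)
      | cons b bs' => simp

-- the state-machine fold of A equals block-wise processing of pvBlocksR, for each mode
theorem pvA_block (t : List String) : ∀ (inp out : List String),
    ((t.foldl pvStepA (0, inp, out)).2 = (pvBlocksR t).foldl pvProcStep (inp, out)) ∧
    ((t.foldl pvStepA (1, inp, out)).2 =
       (match pvBlocksR t with
        | b :: bs => bs.foldl pvProcStep (inp ++ b, out)
        | [] => (inp, out))) ∧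
    ((t.foldl pvStepA (2, inp, out)).2 =
       (match pvBlocksR t with
        | b :: bs => bs.foldl pvProcStep (inp, out ++ b)
        | [] => (inp, out))) := by
  induction t with
  | nil =>
    intro inp out
    refine ⟨by simp [pvBlocksR, pvProcStep, pvScan], by simp [pvBlocksR], by simp [pvBlocksR]⟩
  | cons l t ih =>
    intro inp out
    by_cases hd : PySem.Str.strip l = "\"\"\""
    · -- delimiter line: all modes reset to 0
      have h0 := (ih inp out).1
      refine ⟨?_, ?_, ?_⟩ <;>
        simp [pvStepA, hd, pvBlocksR, pvProcStep, pvScan, h0]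
    · by_cases hI : PySem.Str.startswith l "Input:"
      · -- marker Input: in mode 0; in modes 1/2 it is an ordinary line
        refine ⟨?_, ?_, ?_⟩
        · have h1 := (ih inp out).2.1
          simp only [List.foldl_cons, pvStepA, hd, if_neg hd]
          simp only [if_pos rfl, if_pos hI]
          first
          | rw [h1]
          | (simp only [if_true, if_false]; rw [h1])
          simp only [pvBlocksR, if_neg hd]
          cases hb : pvBlocksR t with
          | nil => exact absurd hb (pvBlocksR_ne_nil t)
          | cons b bs =>
            simp at hI
            simp [pvProcStep, pvScan, hI]
        · have h1 := (ih (inp ++ [l]) out).2.1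
          simp only [List.foldl_cons, pvStepA, if_neg hd]
          norm_num
          first
          | rw [h1]
          | (simp only [if_true, if_false]; rw [h1])
          simp only [pvBlocksR, if_neg hd]
          cases hb : pvBlocksR t with
          | nil => exact absurd hb (pvBlocksR_ne_nil t)
          | cons b bs => simp
        · have h2 := (ih inp (out ++ [l])).2.2
          simp only [List.foldl_cons, pvStepA, if_neg hd]
          norm_num
          first
          | rw [h2]
          | (simp only [if_true, if_false]; rw [h2])
          simp only [pvBlocksR, if_neg hd]
          cases hb : pvBlocksR t with
          | nil => exact absurd hb (pvBlocksR_ne_nil t)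
          | cons b bs => simp
      · by_cases hO : PySem.Str.startswith l "Output:"
        · refine ⟨?_, ?_, ?_⟩
          · have h2 := (ih inp out).2.2
            simp only [List.foldl_cons, pvStepA, if_neg hd]
            simp only [if_pos rfl, if_neg hI, if_pos hO]
            first
            | rw [h2]
            | (simp only [if_true, if_false]; rw [h2])
            simp only [pvBlocksR, if_neg hd]
            cases hb : pvBlocksR t with
            | nil => exact absurd hb (pvBlocksR_ne_nil t)
            | cons b bs =>
              simp at hI hO
              simp [pvProcStep, pvScan, hI, hO]
          · have h1 := (ih (inp ++ [l]) out).2.1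
            simp only [List.foldl_cons, pvStepA, if_neg hd]
            norm_num
            first
            | rw [h1]
            | (simp only [if_true, if_false]; rw [h1])
            simp only [pvBlocksR, if_neg hd]
            cases hb : pvBlocksR t with
            | nil => exact absurd hb (pvBlocksR_ne_nil t)
            | cons b bs => simp
          · have h2 := (ih inp (out ++ [l])).2.2
            simp only [List.foldl_cons, pvStepA, if_neg hd]
            norm_num
            first
            | rw [h2]
            | (simp only [if_true, if_false]; rw [h2])
            simp only [pvBlocksR, if_neg hd]
            cases hb : pvBlocksR t with
            | nil => exact absurd hb (pvBlocksR_ne_nil t)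
            | cons b bs => simp
        · refine ⟨?_, ?_, ?_⟩
          · have h0 := (ih inp out).1
            simp only [List.foldl_cons, pvStepA, if_neg hd]
            simp only [if_pos rfl, if_neg hI, if_neg hO]
            first
            | rw [h0]
            | (simp only [if_true, if_false]; rw [h0])
            simp only [pvBlocksR, if_neg hd]
            cases hb : pvBlocksR t with
            | nil => exact absurd hb (pvBlocksR_ne_nil t)
            | cons b bs =>
              simp at hI hO
              simp [pvProcStep, pvScan, hI, hO]
          · have h1 := (ih (inp ++ [l]) out).2.1
            simp only [List.foldl_cons, pvStepA, if_neg hd]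
            norm_num
            first
            | rw [h1]
            | (simp only [if_true, if_false]; rw [h1])
            simp only [pvBlocksR, if_neg hd]
            cases hb : pvBlocksR t with
            | nil => exact absurd hb (pvBlocksR_ne_nil t)
            | cons b bs => simp
          · have h2 := (ih inp (out ++ [l])).2.2
            simp only [List.foldl_cons, pvStepA, if_neg hd]
            norm_num
            first
            | rw [h2]
            | (simp only [if_true, if_false]; rw [h2])
            simp only [pvBlocksR, if_neg hd]
            cases hb : pvBlocksR t with
            | nil => exact absurd hb (pvBlocksR_ne_nil t)
            | cons b bs => simp

-- ===== VERDICT (by name: the statement is the Claim_ definition above) =====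
theorem split_one_record_spec : Claim_equal_split_one_record := by
  intro record _
  show ((record.foldl pvStepA (0, [], [])).2.1, (record.foldl pvStepA (0, [], [])).2.2) =
    ((record.foldl pvSplitStep ([], [])).1 ++ [(record.foldl pvSplitStep ([], [])).2]).foldl pvProcStep ([], [])
  have hsplit := pvSplit_eq_blocksR record [] []
  have hA := (pvA_block record [] []).1
  cases hb : pvBlocksR record with
  | nil => exact absurd hb (pvBlocksR_ne_nil record)
  | cons b bs =>
    simp only [hb] at hsplit hA
    simp only [List.nil_append] at hsplit
    rw [Prod.mk.eta, hsplit]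
    exact hA
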